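-- pv_equiv track=rewrite | github.com/NTX-McGill/NeuroTechX-McGill-2019 | offline/ML/nn_clf.py | get_start_indices
-- ===== SOURCE A (Python) =====
-- def get_start_indices(ch):
--     start_indices = [100]
--     i = 0
--     while i < len(ch):
--         if ch[i] > 100:
--             start_indices.append(i)
--             i += 500
--         i += 1
--     return start_indices
-- ===== SOURCE B (Python) =====
-- def get_start_indices(ch):
--     # Stage 1: collect all indices whose value exceeds 100.
--     hits = [i for i, v in enumerate(ch) if v > 100]
--
--     # Stage 2: greedily pick hits, each at least 501 beyond the previous pick.
--     def pick(hs):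
--         if not hs:
--             return []
--         first = hs[0]
--         return [first] + pick([h for h in hs if h >= first + 501])
--
--     return [100] + pick(hits)
-- ===== Notes on version B (the rewrite author's own statement) =====
-- stated objective: alternative
-- what changed: Replaces A's single index-mutating while loop (which jumps the counter 500 ahead after a hit) by two stages: a comprehension collecting all indices with value > 100, then a recursive greedy selection over that hit list that keeps each hit at least 501 beyond the previous pick.
import Mathlib
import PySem

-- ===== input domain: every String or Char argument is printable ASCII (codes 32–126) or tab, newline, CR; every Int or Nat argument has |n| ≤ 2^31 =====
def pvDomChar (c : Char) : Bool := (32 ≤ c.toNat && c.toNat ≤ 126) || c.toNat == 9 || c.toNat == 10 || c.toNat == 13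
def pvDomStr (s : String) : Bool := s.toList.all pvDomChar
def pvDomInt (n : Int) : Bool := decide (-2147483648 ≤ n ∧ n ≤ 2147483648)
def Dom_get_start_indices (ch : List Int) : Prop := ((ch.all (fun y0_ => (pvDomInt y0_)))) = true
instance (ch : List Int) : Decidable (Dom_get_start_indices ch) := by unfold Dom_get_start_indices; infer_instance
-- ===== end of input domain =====

-- B replaces A's index-jumping while loop by two stages: collect all hit indices
-- (value > 100), then greedily pick hits 501 apart by recursion (objective: alternative).

-- ===== PORT A =====
-- A's while loop; i increases by at least 1 each iteration, so fuel = ch.length is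
-- always enough (when fuel runs out, i ≥ ch.length and the guard would fail anyway).
-- ch[i] is read only under the guard 0 ≤ i < len, where pyGetD is exact.
def get_start_indices_loop (ch : List Int) (fuel : Nat) (i : Int) (acc : List Int) : List Int :=
  match fuel with
  | 0 => acc
  | fuel + 1 =>
    if i < (ch.length : Int) then
      if 100 < PySem.List.pyGetD ch i 0 then
        get_start_indices_loop ch fuel ((i + 500) + 1) (acc ++ [i])   -- i += 500; i += 1
      else
        get_start_indices_loop ch fuel (i + 1) acc                    -- i += 1
    else acc

def get_start_indices (ch : List Int) : List Int :=
  get_start_indices_loop ch ch.length 0 [100]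

-- ===== PORT B =====
-- stage 1 of Source B: hits = [i for i, v in enumerate(ch) if v > 100]
def pvHits (ch : List Int) : List Int :=
  ((PySem.List.enumerate ch 0).filter (fun p => 100 < p.2)).map (fun p => p.1)

-- stage 2 of Source B: recursive greedy pick over the hit list
def pvPick (hs : List Int) : List Int :=
  match hs with
  | [] => []
  | first :: rest =>
      first :: pvPick ((first :: rest).filter (fun h => first + 501 ≤ h))
termination_by hs.length
decreasing_by
  simp only [List.filter_cons]
  rw [if_neg (by simp)]
  have := List.length_filter_le (fun h => decide (first + 501 ≤ h)) rest
  simp only [List.length_cons]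
  omega

def get_start_indices_alt (ch : List Int) : List Int :=
  100 :: pvPick (pvHits ch)   -- [100] + pick(hits)

-- ===== PRECONDITION & SPEC =====
def Spec_get_start_indices (ch : List Int) (out : List Int) : Prop := out = get_start_indices_alt ch
instance (ch : List Int) (out : List Int) : Decidable (Spec_get_start_indices ch out) := by unfold Spec_get_start_indices; infer_instance

-- ===== CLAIM (what is proved, stated in full; the proofs are below) =====
def Claim_equal_get_start_indices : Prop := ∀ (ch : List Int), Dom_get_start_indices ch → Spec_get_start_indices ch (get_start_indices ch)

-- ===== LEMMAS AND PROOFS =====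

-- the hit list is the index range filtered by the hit predicate
theorem pvHitsEq (ch : List Int) :
    pvHits ch = (PySem.List.pyRange 0 (ch.length : Int) 1).filter
      (fun j => 100 < PySem.List.pyGetD ch j 0) := by
  unfold pvHits
  rw [PySem.List.enumerate_eq_map_pyRange (d := 0), List.filter_map, List.map_map]
  simp [Function.comp_def]

-- filtering a range by "t ≤ ·" from a left end a ≤ t chops it to start at t
theorem pvRangeFilterGe (a b t : Int) (ha : a ≤ t) :
    (PySem.List.pyRange a b 1).filter (fun h => t ≤ h) = PySem.List.pyRange t b 1 := by
  by_cases hb : t ≤ b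
  · rw [PySem.List.pyRange_one_append a t b ha hb, List.filter_append]
    have h1 : (PySem.List.pyRange a t 1).filter (fun h => decide (t ≤ h)) = [] := by
      rw [List.filter_eq_nil_iff]
      intro x hx
      have := (PySem.List.mem_pyRange_one).1 hx
      simp; omega
    have h2 : (PySem.List.pyRange t b 1).filter (fun h => decide (t ≤ h))
        = PySem.List.pyRange t b 1 := by
      rw [List.filter_eq_self]
      intro x hx
      have := (PySem.List.mem_pyRange_one).1 hx
      simp; omega
    rw [h1, h2, List.nil_append]
  · rw [PySem.List.pyRange_one_eq_nil (show b ≤ t by omega), List.filter_eq_nil_iff]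
    intro x hx
    have := (PySem.List.mem_pyRange_one).1 hx
    simp; omega

-- Main invariant: A's loop at position i equals acc ++ the greedy pick over the
-- hits remaining in the index range [i, len).
theorem pvBridge (ch : List Int) : ∀ (fuel : Nat) (i : Int) (acc : List Int),
    (ch.length : Int) ≤ i + fuel →
    get_start_indices_loop ch fuel i acc =
      acc ++ pvPick ((PySem.List.pyRange i (ch.length : Int) 1).filter
        (fun j => 100 < PySem.List.pyGetD ch j 0)) := by
  intro fuel
  induction fuel using Nat.strong_induction_on with
  | _ fuel ih =>
    intro i acc hf
    match fuel with
    | 0 =>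
      rw [PySem.List.pyRange_one_eq_nil (by push_cast at hf ⊢; omega)]
      simp [get_start_indices_loop, pvPick]
    | fuel + 1 =>
      by_cases hi : i < (ch.length : Int)
      · rw [PySem.List.pyRange_one_cons hi, List.filter_cons]
        by_cases hv : 100 < PySem.List.pyGetD ch i 0
        · rw [if_pos (by simpa using hv)]
          rw [pvPick]
          simp only [get_start_indices_loop, if_pos hi, if_pos hv]
          rw [ih fuel (by omega) ((i + 500) + 1) (acc ++ [i]) (by push_cast at hf ⊢; omega)]
          have hsw : ((i :: (PySem.List.pyRange (i+1) (ch.length : Int) 1).filter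
                (fun j => 100 < PySem.List.pyGetD ch j 0)).filter (fun h => i + 501 ≤ h))
              = (PySem.List.pyRange (i + 501) (ch.length : Int) 1).filter
                (fun j => 100 < PySem.List.pyGetD ch j 0) := by
            rw [List.filter_cons, if_neg (by simp), List.filter_comm,
                pvRangeFilterGe (i+1) (ch.length : Int) (i+501) (by omega)]
          rw [hsw]
          rw [show (i + 500) + 1 = i + 501 by omega]
          simp
        · rw [if_neg (by simpa using hv)]
          simp only [get_start_indices_loop, if_pos hi, if_neg hv]
          exact ih fuel (by omega) (i+1) acc (by push_cast at hf ⊢; omega)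
      · rw [PySem.List.pyRange_one_eq_nil (by omega)]
        simp only [List.filter_nil, pvPick, List.append_nil]
        cases fuel <;> simp [get_start_indices_loop, hi]

-- ===== VERDICT (by name: the statement is the Claim_ definition above) =====
theorem get_start_indices_spec : Claim_equal_get_start_indices := by
  intro ch _
  unfold Spec_get_start_indices get_start_indices get_start_indices_alt
  rw [pvBridge ch ch.length 0 [100] (by omega), pvHitsEq]
  rfl
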